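-- pv_equiv track=rewrite | github.com/drlgfx02xhy/USTC_AD2022_Lab | lab1/4顺时针打印矩阵.py | formulate
-- ===== SOURCE A (Python) =====
-- def formulate1(str, avoid):
--     "格式化字符串为一维列表"
--     i = 0
--     length = len(str)
--     num = ""
--     output = []
--     while i < length:
--         if str[i] in avoid:
--             i += 1
--             continue
--         while i < length and str[i] not in avoid:
--             num += str[i]
--             i += 1
--         temp = int(num)
--         num = ""
--         output.append(temp)
--     return output
--
-- def formulate(str,avoid):
--     "格式化字符串为二维列表"
--     i = 0
--     tempstr = ""
--     output = []
--     str = str.strip("[").strip("]")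
--     length = len(str)
--     while i < length:
--         while i < length and str[i] != "]":
--             tempstr += str[i]
--             i += 1
--         output.append(formulate1(tempstr, avoid))
--         tempstr = ""
--         i += 1
--     return output
-- ===== SOURCE B (Python) =====
-- def formulate(str, avoid):
--     "格式化字符串为二维列表 — split-based re-implementation"
--     s = str.strip("[").strip("]")
--     if not s:
--         return []
--     result = []
--     for row in s.split("]"):
--         parts = [row]
--         for c in dict.fromkeys(avoid):
--             parts = [piece for p in parts for piece in p.split(c)]
--         result.append([int(p) for p in parts if p])
--     return result
-- ===== Notes on version B (the rewrite author's own statement) =====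
-- stated objective: simpler
-- what changed: Replaces A's index-driven nested while-loop character scanner with a declarative split pipeline: strip the outer brackets, split into rows on ']', split each row successively on every distinct avoid character, drop empty tokens and map int over the rest.
import Mathlib
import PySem

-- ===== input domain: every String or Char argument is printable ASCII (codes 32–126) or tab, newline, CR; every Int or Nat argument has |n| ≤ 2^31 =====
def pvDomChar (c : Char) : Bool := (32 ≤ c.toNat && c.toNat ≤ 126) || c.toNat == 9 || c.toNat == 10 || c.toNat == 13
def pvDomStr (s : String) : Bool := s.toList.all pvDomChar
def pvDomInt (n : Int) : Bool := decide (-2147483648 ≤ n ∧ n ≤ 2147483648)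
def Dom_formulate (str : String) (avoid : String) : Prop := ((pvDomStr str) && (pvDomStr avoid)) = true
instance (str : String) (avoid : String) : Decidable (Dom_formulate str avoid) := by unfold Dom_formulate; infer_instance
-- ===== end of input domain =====

-- B replaces A's index-driven nested while-loop scanner with a strip/split pipeline (objective: simpler).

-- ===== PORT A =====
-- inner while of formulate1: "while i < length and str[i] not in avoid: num += str[i]; i += 1"
-- returns (num, remaining characters); `str[i] in avoid` for the single char str[i] is membership.
def pvF1Inner (cs : List Char) (avoid : List Char) (num : List Char) : List Char × List Char :=
  match cs with
  | [] => (num, [])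
  | c :: rest => if avoid.contains c then (num, c :: rest) else pvF1Inner rest avoid (num ++ [c])

-- termination fact the outer loop's recursion cites
theorem pvF1Inner_snd_len (cs : List Char) (avoid : List Char) (num : List Char) :
    (pvF1Inner cs avoid num).2.length ≤ cs.length := by
  induction cs generalizing num with
  | nil => simp [pvF1Inner]
  | cons c rest ih =>
    simp only [pvF1Inner]
    split
    · simp
    · exact Nat.le_succ_of_le (ih _)

-- formulate1: outer while over the string, tokenising maximal runs of non-avoid characters.
-- temp = int(num): PySem.Int.ofChars?; none = ValueError in Python, excluded by Pre_formulate (getD 0 is a placeholder outside Pre_).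
def pvF1Loop (avoid : List Char) : List Char → List Int
  | [] => []
  | c :: rest =>
    if h : avoid.contains c then pvF1Loop avoid rest
    else
      have hlt : (pvF1Inner (c :: rest) avoid []).2.length < (c :: rest).length := by
        simp only [pvF1Inner, h, Bool.false_eq_true, if_false, List.nil_append]
        exact Nat.lt_succ_of_le (pvF1Inner_snd_len rest avoid [c])
      ((PySem.Int.ofChars? (pvF1Inner (c :: rest) avoid []).1).getD 0)
        :: pvF1Loop avoid (pvF1Inner (c :: rest) avoid []).2
  termination_by cs => cs.length
  decreasing_by all_goals first | assumption | simp

-- inner while of formulate: "while i < length and str[i] != ']': tempstr += str[i]; i += 1"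
def pvChunkInner (cs : List Char) (tempstr : List Char) : List Char × List Char :=
  match cs with
  | [] => (tempstr, [])
  | c :: rest => if c == ']' then (tempstr, c :: rest) else pvChunkInner rest (tempstr ++ [c])

theorem pvChunkInner_snd_len (cs : List Char) (tempstr : List Char) :
    (pvChunkInner cs tempstr).2.length ≤ cs.length := by
  induction cs generalizing tempstr with
  | nil => simp [pvChunkInner]
  | cons c rest ih =>
    simp only [pvChunkInner]
    split
    · simp
    · exact Nat.le_succ_of_le (ih _)

-- outer while of formulate: collect a row up to ']', append formulate1(row, avoid), skip the ']' (i += 1)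
def pvChunkLoop (avoid : List Char) : List Char → List (List Int)
  | [] => []
  | c :: rest =>
      have hlt : ((pvChunkInner (c :: rest) []).2.drop 1).length < (c :: rest).length := by
        have := pvChunkInner_snd_len (c :: rest) []
        simp only [List.length_drop]
        simp only [List.length_cons] at this ⊢
        omega
      pvF1Loop avoid (pvChunkInner (c :: rest) []).1
        :: pvChunkLoop avoid ((pvChunkInner (c :: rest) []).2.drop 1)
  termination_by cs => cs.length
  decreasing_by all_goals first | assumption | simp

-- str = str.strip("[").strip("]")
def formulate (str : String) (avoid : String) : List (List Int) :=
  pvChunkLoop avoid.toList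
    (PySem.Chars.stripChars (PySem.Chars.stripChars str.toList ['[']) [']'])

-- ===== PORT B =====
-- one row: split successively on every avoid character, drop empty tokens, map int
def pvRowInts (avoid : List Char) (row : List Char) : List Int :=
  -- 'for c in dict.fromkeys(avoid)' = ordered dedup of avoid's characters
  let parts := (PySem.List.dedup avoid).foldl
    (fun ps c => ps.flatMap (fun p => PySem.Chars.splitOn p [c])) [row]
  (parts.filter (fun p => !p.isEmpty)).map (fun p => (PySem.Int.ofChars? p).getD 0)

def formulate_alt (str : String) (avoid : String) : List (List Int) :=
  let s := PySem.Chars.stripChars (PySem.Chars.stripChars str.toList ['[']) [']']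
  if s.isEmpty then []
  else (PySem.Chars.splitOn s [']']).map (pvRowInts avoid.toList)

-- ===== PRECONDITION & SPEC =====
-- spec-side splitter (keeps empty pieces), used only by Pre_ and the proofs
def pvSplitP (p : Char → Bool) : List Char → List (List Char)
  | [] => [[]]
  | c :: rest =>
    if p c then [] :: pvSplitP p rest
    else
      match pvSplitP p rest with
      | [] => [[c]]
      | t :: ts => (c :: t) :: ts

-- Pre_ excludes exactly the inputs on which Python A raises ValueError: some maximal
-- run of non-avoid characters inside a ']'-separated row is not a valid int literal.
def Pre_formulate (str : String) (avoid : String) : Prop :=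
  ∀ row ∈ pvSplitP (fun c => c == ']')
      (PySem.Chars.stripChars (PySem.Chars.stripChars str.toList ['[']) [']']),
    ∀ tok ∈ (pvSplitP (fun c => avoid.toList.contains c) row).filter (fun t => !t.isEmpty),
      (PySem.Int.ofChars? tok).isSome = true
instance (str : String) (avoid : String) : Decidable (Pre_formulate str avoid) := by
  unfold Pre_formulate; infer_instance

def pvWitness_formulate : String × String := ("[[1,2],[3,4]]", ",[")

def Spec_formulate (str : String) (avoid : String) (out : List (List Int)) : Prop := out = formulate_alt str avoid
instance (str : String) (avoid : String) (out : List (List Int)) : Decidable (Spec_formulate str avoid out) := by unfold Spec_formulate; infer_instance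

-- ===== CLAIM (what is proved, stated in full; the proofs are below) =====
def Claim_equal_formulate : Prop := ∀ (str : String) (avoid : String), Dom_formulate str avoid → Pre_formulate str avoid → Spec_formulate str avoid (formulate str avoid)

-- ===== LEMMAS AND PROOFS =====

theorem pvSplitP_ne_nil (p : Char → Bool) (l : List Char) : pvSplitP p l ≠ [] := by
  cases l with
  | nil => simp [pvSplitP]
  | cons c rest =>
    simp only [pvSplitP]
    split
    · simp
    · split <;> simp

-- prepend x to the first piece
def pvConsHead (x : List Char) : List (List Char) → List (List Char)
  | [] => [x]
  | t :: ts => (x ++ t) :: ts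

theorem pvSplitOn_go_spec (c : Char) :
    ∀ (fuel : Nat) (l cur : List Char) (acc : List (List Char)), l.length < fuel →
      PySem.Chars.splitOn.go [c] fuel l cur acc
        = acc.reverse ++ pvConsHead cur.reverse (pvSplitP (fun a => a == c) l) := by
  intro fuel
  induction fuel with
  | zero => intro l cur acc h; omega
  | succ f ih =>
    intro l cur acc h
    cases l with
    | nil =>
      simp [PySem.Chars.splitOn.go, pvSplitP, pvConsHead]
    | cons d rest =>
      simp only [PySem.Chars.splitOn.go]
      by_cases hdc : d = c
      · subst hdc
        have hpre : List.isPrefixOf [d] (d :: rest) = true := by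
          simp [List.isPrefixOf]
        rw [if_pos hpre]
        have hdrop : List.drop (List.length [d]) (d :: rest) = rest := by simp
        rw [hdrop, ih _ _ _ (by simpa using Nat.lt_of_succ_lt_succ h)]
        rcases hsp : pvSplitP (fun a => a == d) rest with _ | ⟨t, ts⟩
        · exact absurd hsp (pvSplitP_ne_nil _ _)
        · simp [pvSplitP, hsp, pvConsHead, List.append_assoc]
      · have hpre : List.isPrefixOf [c] (d :: rest) = false := by
          simp [List.isPrefixOf, Ne.symm hdc]
        rw [if_neg (by simp [hpre])]
        rw [ih _ _ _ (by simpa using Nat.lt_of_succ_lt_succ h)]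
        simp only [pvSplitP, List.reverse_cons]
        rw [if_neg (by simp [hdc])]
        rcases hsp : pvSplitP (fun a => a == c) rest with _ | ⟨t, ts⟩
        · exact absurd hsp (pvSplitP_ne_nil _ _)
        · simp [pvConsHead, List.append_assoc]

theorem pvSplitOn_singleton (l : List Char) (c : Char) :
    PySem.Chars.splitOn l [c] = pvSplitP (fun a => a == c) l := by
  show PySem.Chars.splitOn.go [c] (l.length + 1) l [] [] = _
  rw [pvSplitOn_go_spec c (l.length + 1) l [] [] (Nat.lt_succ_self _)]
  rcases hsp : pvSplitP (fun a => a == c) l with _ | ⟨t, ts⟩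
  · exact absurd hsp (pvSplitP_ne_nil _ _)
  · simp [pvConsHead]

-- splitting an already-split list by a second predicate = splitting by the disjunction
theorem pvSplitP_flatMap (p q : Char → Bool) (l : List Char) :
    (pvSplitP p l).flatMap (pvSplitP q) = pvSplitP (fun a => p a || q a) l := by
  induction l with
  | nil => simp [pvSplitP]
  | cons a l ih =>
    by_cases hp : p a
    · simp only [pvSplitP, hp, if_true, Bool.true_or, List.flatMap_cons]
      rw [← ih]
      simp [pvSplitP]
    · rcases hsl : pvSplitP p l with _ | ⟨t, ts⟩
      · exact absurd hsl (pvSplitP_ne_nil _ _)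
      · simp only [pvSplitP, hp, Bool.false_eq_true, if_false, hsl, List.flatMap_cons]
        by_cases hq : q a
        · simp only [pvSplitP, hq, if_true, hp, Bool.false_or]
          rw [← ih]
          simp [hsl]
        · simp only [pvSplitP, hq, hp, Bool.false_eq_true, Bool.false_or, if_false]
          rw [← ih]
          simp only [hsl, List.flatMap_cons]
          rcases hqt : pvSplitP q t with _ | ⟨u, us⟩
          · exact absurd hqt (pvSplitP_ne_nil _ _)
          · simp

-- B's per-row foldl of splits = one split on membership in avoid
theorem pvFoldl_split (avoid : List Char) (ps : List (List Char)) :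
    avoid.foldl (fun ps c => ps.flatMap (fun p => PySem.Chars.splitOn p [c])) ps
      = ps.flatMap (pvSplitP (fun a => avoid.contains a)) := by
  induction avoid generalizing ps with
  | nil =>
    simp only [List.foldl_nil, List.contains_nil]
    have hfalse : ∀ p : List Char, pvSplitP (fun _ => false) p = [p] := by
      intro p; induction p with
      | nil => rfl
      | cons c r ihp => simp [pvSplitP, ihp]
    induction ps with
    | nil => rfl
    | cons p ps ihps => rw [List.flatMap_cons, hfalse, ← ihps]; rfl
  | cons c cs ih =>
    simp only [List.foldl_cons]
    rw [ih]
    rw [List.flatMap_assoc]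
    congr 1
    funext p
    rw [pvSplitOn_singleton, pvSplitP_flatMap]
    have hpred : (fun a => a == c || cs.contains a) = (fun a => (c :: cs).contains a) := by
      funext a; by_cases hac : a = c <;> simp [List.contains_cons, hac]
    rw [hpred]

-- characterisation of one step of pvSplitP via takeWhile/dropWhile
theorem pvSplitP_decomp (p : Char → Bool) (l : List Char) :
    pvSplitP p l =
      match l.dropWhile (fun a => !p a) with
      | [] => [l.takeWhile (fun a => !p a)]
      | _ :: rest => l.takeWhile (fun a => !p a) :: pvSplitP p rest := by
  induction l with
  | nil => rfl
  | cons a l ih =>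
    by_cases hp : p a
    · simp [pvSplitP, hp, List.dropWhile_cons, List.takeWhile_cons]
    · have hdw : (a :: l).dropWhile (fun a => !p a) = l.dropWhile (fun a => !p a) := by
        simp [List.dropWhile_cons, hp]
      have htw : (a :: l).takeWhile (fun a => !p a) = a :: l.takeWhile (fun a => !p a) := by
        simp [List.takeWhile_cons, hp]
      rw [hdw, htw]
      have hsp : pvSplitP p (a :: l)
          = match pvSplitP p l with | [] => [[a]] | t :: ts => (a :: t) :: ts := by
        simp [pvSplitP, hp]
      rw [hsp, ih]
      rcases hd2 : l.dropWhile (fun a => !p a) with _ | ⟨d, rest⟩ <;> rfl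

theorem pvF1Inner_spec (avoid : List Char) (cs num : List Char) :
    pvF1Inner cs avoid num
      = (num ++ cs.takeWhile (fun c => !avoid.contains c),
         cs.dropWhile (fun c => !avoid.contains c)) := by
  induction cs generalizing num with
  | nil => simp [pvF1Inner]
  | cons c rest ih =>
    by_cases h : c ∈ avoid
    · simp [pvF1Inner, h, List.takeWhile_cons, List.dropWhile_cons]
    · simp [pvF1Inner, h, List.takeWhile_cons, List.dropWhile_cons, ih]

theorem pvChunkInner_spec (cs tempstr : List Char) :
    pvChunkInner cs tempstr
      = (tempstr ++ cs.takeWhile (fun c => !(c == ']')), cs.dropWhile (fun c => !(c == ']'))) := by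
  induction cs generalizing tempstr with
  | nil => simp [pvChunkInner]
  | cons c rest ih =>
    by_cases h : c = ']'
    · simp [pvChunkInner, h, List.takeWhile_cons, List.dropWhile_cons]
    · simp [pvChunkInner, h, List.takeWhile_cons, List.dropWhile_cons, ih]

-- A's tokenizer = split on avoid-membership, empty pieces dropped, each token parsed
theorem pvF1Loop_eq (avoid : List Char) (row : List Char) :
    pvF1Loop avoid row
      = ((pvSplitP (fun c => avoid.contains c) row).filter (fun t => !t.isEmpty)).map
          (fun p => (PySem.Int.ofChars? p).getD 0) := by
  induction hn : row.length using Nat.strong_induction_on generalizing row with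
  | _ n ih =>
  cases row with
  | nil => simp [pvF1Loop, pvSplitP]
  | cons c rest =>
    by_cases h : avoid.contains c
    · rw [pvF1Loop]
      simp only [h, dite_true, pvSplitP, List.filter_cons, List.isEmpty_nil,
        Bool.not_true, Bool.false_eq_true, if_false]
      exact ih rest.length (by subst hn; simp) rest rfl
    · rw [pvF1Loop]
      simp only [h, Bool.false_eq_true, dite_false]
      rw [pvF1Inner_spec]
      simp only [List.nil_append]
      rw [pvSplitP_decomp]
      simp only [List.takeWhile_cons, List.dropWhile_cons, h, Bool.not_false,
        Bool.false_eq_true, if_true]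
      rcases hdw : rest.dropWhile (fun c => !avoid.contains c) with _ | ⟨d, dtail⟩
      · simp only [hdw]
        rw [pvF1Loop]
        simp only [List.filter_cons, List.isEmpty_cons, Bool.not_false, if_true, List.map_cons]
        simp [List.filter, pvSplitP, List.map]
      · have hd : avoid.contains d = true := by
          have h2 := List.head?_dropWhile_not (fun c => !avoid.contains c) rest
          rw [hdw] at h2
          simpa using h2
        simp only [hdw]
        have hlen : dtail.length < n := by
          subst hn
          have h1 : (rest.dropWhile (fun c => !avoid.contains c)).length ≤ rest.length :=
            List.length_dropWhile_le _ _
          rw [hdw] at h1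
          simp only [List.length_cons] at h1 ⊢
          omega
        rw [pvF1Loop]
        simp only [hd, dite_true]
        rw [ih dtail.length hlen dtail rfl]
        simp [List.filter_cons]

-- A's outer loop = split on ']' (valid because the stripped string never ends in ']')
theorem pvChunkLoop_eq (avoid : List Char) (cs : List Char) (hne : cs ≠ [])
    (hlast : cs.getLast? ≠ some ']') :
    pvChunkLoop avoid cs = (pvSplitP (fun a => a == ']') cs).map (pvF1Loop avoid) := by
  induction hn : cs.length using Nat.strong_induction_on generalizing cs with
  | _ n ih =>
  cases cs with
  | nil => exact absurd rfl hne
  | cons c rest =>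
    rw [pvChunkLoop]
    rw [pvChunkInner_spec]
    simp only [List.nil_append]
    rw [pvSplitP_decomp]
    rcases hdw : (c :: rest).dropWhile (fun a => !(a == ']')) with _ | ⟨d, dtail⟩
    · simp [hdw, pvChunkLoop]
    · have hd : d = ']' := by
        have h2 := List.head?_dropWhile_not (fun a => !(a == ']')) (c :: rest)
        rw [hdw] at h2
        simpa using h2
      have hsplit : c :: rest = (c :: rest).takeWhile (fun a => !(a == ']')) ++ d :: dtail := by
        rw [← hdw]; exact (List.takeWhile_append_dropWhile).symm
      have hdt : dtail ≠ [] := by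
        intro hnil
        apply hlast
        rw [hsplit, hnil, hd,
          List.getLast?_append_of_ne_nil _ (by simp : ([']'] : List Char) ≠ [])]
        rfl
      have hlast' : dtail.getLast? ≠ some ']' := by
        intro hcon
        apply hlast
        have h3 : (d :: dtail).getLast? = dtail.getLast? :=
          List.getLast?_append_of_ne_nil [d] hdt
        rw [hsplit, List.getLast?_append_of_ne_nil _ (List.cons_ne_nil d dtail), h3]
        exact hcon
      have hlen : dtail.length < n := by
        subst hn
        have : (d :: dtail).length ≤ (c :: rest).length := by
          rw [← hdw]; exact List.length_dropWhile_le _ _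
        simp only [List.length_cons] at this ⊢
        omega
      simp only [hdw, hd, List.drop_succ_cons, List.drop_zero, List.map_cons]
      rw [ih dtail.length hlen dtail hdt hlast' rfl]

-- the stripped string never ends with a stripped character
theorem pvStripChars_getLast (t chars : List Char) (c : Char)
    (h : (PySem.Chars.stripChars t chars).getLast? = some c) : chars.contains c = false := by
  simp only [PySem.Chars.stripChars] at h
  rw [List.getLast?_reverse] at h
  have h2 := List.head?_dropWhile_not (fun c => chars.contains c)
    (List.dropWhile (fun c => chars.contains c) t).reverse
  rw [h] at h2
  simpa using h2

-- ===== VERDICT (by name: the statement is the Claim_ definition above) =====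
theorem formulate_spec : Claim_equal_formulate := by
  intro str avoid _ _
  unfold Spec_formulate formulate formulate_alt
  set s := PySem.Chars.stripChars (PySem.Chars.stripChars str.toList ['[']) [']'] with hs
  by_cases hempty : s = []
  · simp [hempty, pvChunkLoop]
  · rw [if_neg (by simpa [List.isEmpty_iff] using hempty)]
    rw [pvSplitOn_singleton]
    have hlast : s.getLast? ≠ some ']' := by
      intro hcon
      have := pvStripChars_getLast (PySem.Chars.stripChars str.toList ['[']) [']'] ']' hcon
      simp at this
    rw [pvChunkLoop_eq avoid.toList s hempty hlast]
    apply List.map_congr_left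
    intro row _
    rw [pvF1Loop_eq]
    unfold pvRowInts
    rw [pvFoldl_split]
    have hpred : (fun a => (PySem.List.dedup avoid.toList).contains a)
        = (fun a => avoid.toList.contains a) := by
      funext a
      simp [List.contains_iff_mem, PySem.List.mem_dedup]
    rw [hpred]
    simp
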